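-- pv_equiv track=rewrite | github.com/hchiam/cognateLanguage | findCollisions.py | justTwoInitSylls_CV
-- ===== SOURCE A (Python) =====
-- def justTwoInitSylls_CV(word):
--     beforeThisIndex = 0
--     afterThisIndex = 0
--     for vowel1 in word:
--         if vowel1 in 'aeiou':
--             afterThisIndex = word.index(vowel1)
--             break
--     for vowel2 in word[afterThisIndex+1:]:
--         if vowel2 in 'aeiou':
--             beforeThisIndex = word[afterThisIndex+1:].index(vowel2)+1 + afterThisIndex+1
--             break
--     if beforeThisIndex!=0:
--         word = word[:beforeThisIndex]
--     return word
-- ===== SOURCE B (Python) =====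
-- def justTwoInitSylls_CV(word):
--     count = 0
--     for i, c in enumerate(word):
--         if c in 'aeiou':
--             count += 1
--             if count == 2:
--                 return word[:i + 1]
--     return word
-- ===== Notes on version B (the rewrite author's own statement) =====
-- stated objective: simpler
-- what changed: Replaced A's two sequential vowel scans with .index rescans and slice rebuilding by a single enumerate pass keeping a vowel counter that returns word[:i+1] at the second vowel.
import Mathlib
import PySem

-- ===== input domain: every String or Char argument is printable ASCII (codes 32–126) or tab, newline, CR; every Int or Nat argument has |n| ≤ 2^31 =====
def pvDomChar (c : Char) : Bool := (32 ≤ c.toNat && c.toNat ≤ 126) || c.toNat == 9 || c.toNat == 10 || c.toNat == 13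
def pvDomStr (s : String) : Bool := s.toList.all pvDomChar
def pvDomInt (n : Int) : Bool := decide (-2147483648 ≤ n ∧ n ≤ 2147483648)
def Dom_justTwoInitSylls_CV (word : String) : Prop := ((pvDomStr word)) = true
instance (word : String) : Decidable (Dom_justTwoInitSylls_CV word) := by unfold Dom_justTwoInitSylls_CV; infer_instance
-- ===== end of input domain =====

-- B replaces A's two sequential scans with .index rescans by one counted pass that
-- returns word[:i+1] at the second vowel (objective: simpler).

-- ===== PORT A =====
def pvVowels : List Char := ['a', 'e', 'i', 'o', 'u']

-- A's first for-loop with break: sets afterThisIndex = word.index(vowel1) at the first vowel.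
-- (word.index never raises here: the scanned character comes from word, so the none branch is unreachable.)
def pvALoop1 (word : List Char) : List Char → Int
  | [] => 0
  | c :: rest =>
    if c ∈ pvVowels then
      match PySem.List.index? word c with
      | some k => (k : Int)
      | none => 0
    else pvALoop1 word rest

-- A's second for-loop with break over tail = word[afterThisIndex+1:].
def pvALoop2 (tail : List Char) (after : Int) : List Char → Int
  | [] => 0
  | c :: rest =>
    if c ∈ pvVowels then
      match PySem.List.index? tail c with
      | some k => (k : Int) + 1 + after + 1
      | none => 0
    else pvALoop2 tail after rest

def justTwoInitSylls_CV (word : String) : String :=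
  let cs := word.toList
  let after := pvALoop1 cs cs
  let tail := PySem.List.slice cs (some (after + 1)) none
  let before := pvALoop2 tail after tail
  if before ≠ 0 then String.ofList (PySem.List.slice cs none (some before)) else word

-- ===== PORT B =====
-- B's single counted pass over enumerate(word): some i = index of the second vowel.
def pvBLoop : List Char → Nat → Nat → Option Nat
  | [], _, _ => none
  | c :: rest, i, count =>
    if c ∈ pvVowels then
      if count + 1 == 2 then some i
      else pvBLoop rest (i + 1) (count + 1)
    else pvBLoop rest (i + 1) count

def justTwoInitSylls_CV_alt (word : String) : String :=
  match pvBLoop word.toList 0 0 with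
  | some i => String.ofList (PySem.List.slice word.toList none (some ((i : Int) + 1)))
  | none => word

-- ===== PRECONDITION & SPEC =====
def Spec_justTwoInitSylls_CV (word : String) (out : String) : Prop := out = justTwoInitSylls_CV_alt word
instance (word : String) (out : String) : Decidable (Spec_justTwoInitSylls_CV word out) := by unfold Spec_justTwoInitSylls_CV; infer_instance

-- ===== CLAIM (what is proved, stated in full; the proofs are below) =====
def Claim_equal_justTwoInitSylls_CV : Prop := ∀ (word : String), Dom_justTwoInitSylls_CV word → Spec_justTwoInitSylls_CV word (justTwoInitSylls_CV word)

-- ===== LEMMAS AND PROOFS =====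

-- index of the first vowel, the common characterisation both ports are reduced to
def pvFvi : List Char → Option Nat
  | [] => none
  | c :: rest => if c ∈ pvVowels then some 0 else (pvFvi rest).map (· + 1)

theorem pvFvi_none_iff (cs : List Char) : pvFvi cs = none ↔ ∀ x ∈ cs, x ∉ pvVowels := by
  induction cs with
  | nil => simp [pvFvi]
  | cons c rest ih =>
    simp only [pvFvi]
    by_cases h : c ∈ pvVowels <;> simp [h, ih]

theorem pvALoop1_split (pre ys : List Char) (hpre : ∀ x ∈ pre, x ∉ pvVowels) :
    pvALoop1 (pre ++ ys) ys =
      match pvFvi ys with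
      | some j => ((pre.length + j : Nat) : Int)
      | none => 0 := by
  induction ys generalizing pre with
  | nil => simp [pvALoop1, pvFvi]
  | cons c rest ih =>
    by_cases h : c ∈ pvVowels
    · have hcpre : c ∉ pre := fun hc => hpre c hc h
      have hidx : PySem.List.index? (pre ++ c :: rest) c = some pre.length :=
        (PySem.List.index?_eq_some_iff _ _ _).mpr ⟨pre, rest, rfl, rfl, hcpre⟩
      simp only [pvALoop1, if_pos h, hidx, pvFvi]
      simp
    · have hpre' : ∀ x ∈ pre ++ [c], x ∉ pvVowels := by
        intro x hx
        rcases List.mem_append.mp hx with hx | hx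
        · exact hpre x hx
        · simp at hx; subst hx; exact h
      have := ih (pre ++ [c]) hpre'
      simp only [List.append_assoc, List.singleton_append] at this
      rw [pvALoop1, if_neg h, this]
      cases hf : pvFvi rest with
      | none => simp [pvFvi, h, hf]
      | some j => simp [pvFvi, h, hf]; push_cast; ring

theorem pvALoop2_split (tail : List Char) (after : Int) (pre ys : List Char)
    (heq : tail = pre ++ ys) (hpre : ∀ x ∈ pre, x ∉ pvVowels) :
    pvALoop2 tail after ys =
      match pvFvi ys with
      | some j => ((pre.length + j : Nat) : Int) + 1 + after + 1
      | none => 0 := by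
  induction ys generalizing pre with
  | nil => simp [pvALoop2, pvFvi]
  | cons c rest ih =>
    by_cases h : c ∈ pvVowels
    · have hcpre : c ∉ pre := fun hc => hpre c hc h
      have hidx : PySem.List.index? tail c = some pre.length := by
        rw [heq]; exact (PySem.List.index?_eq_some_iff _ _ _).mpr ⟨pre, rest, rfl, rfl, hcpre⟩
      simp only [pvALoop2, if_pos h, hidx, pvFvi]
      simp
    · have hpre' : ∀ x ∈ pre ++ [c], x ∉ pvVowels := by
        intro x hx
        rcases List.mem_append.mp hx with hx | hx
        · exact hpre x hx
        · simp at hx; subst hx; exact h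
      have heq' : tail = (pre ++ [c]) ++ rest := by simp [heq]
      have := ih (pre ++ [c]) heq' hpre'
      rw [pvALoop2, if_neg h, this]
      cases hf : pvFvi rest with
      | none => simp [pvFvi, h, hf]
      | some j => simp [pvFvi, h, hf]; push_cast; ring

theorem pvBLoop_one (cs : List Char) (i : Nat) :
    pvBLoop cs i 1 = (pvFvi cs).map (· + i) := by
  induction cs generalizing i with
  | nil => simp [pvBLoop, pvFvi]
  | cons c rest ih =>
    by_cases h : c ∈ pvVowels
    · simp [pvBLoop, h, pvFvi]
    · rw [pvBLoop, if_neg h, ih]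
      cases hf : pvFvi rest with
      | none => simp [pvFvi, h, hf]
      | some j => simp [pvFvi, h, hf]; omega

theorem pvBLoop_zero (cs : List Char) (i : Nat) :
    pvBLoop cs i 0 =
      match pvFvi cs with
      | none => none
      | some j => (pvFvi (cs.drop (j + 1))).map (· + (i + j + 1)) := by
  induction cs generalizing i with
  | nil => simp [pvBLoop, pvFvi]
  | cons c rest ih =>
    by_cases h : c ∈ pvVowels
    · simp only [pvBLoop, if_pos h]
      simp [pvFvi, h]
      exact pvBLoop_one rest (i + 1)
    · simp only [pvBLoop, if_neg h, ih]
      cases hf : pvFvi rest with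
      | none => simp [pvFvi, h, hf]
      | some j =>
        simp only [pvFvi, if_neg h, hf, Option.map_some, List.drop_succ_cons]
        cases pvFvi (rest.drop (j + 1)) <;> simp <;> omega

-- ===== VERDICT (by name: the statement is the Claim_ definition above) =====
theorem justTwoInitSylls_CV_spec : Claim_equal_justTwoInitSylls_CV := by
  intro word _
  unfold Spec_justTwoInitSylls_CV
  simp only [justTwoInitSylls_CV, justTwoInitSylls_CV_alt]
  have h1 := pvALoop1_split [] word.toList (by simp)
  simp only [List.nil_append, List.length_nil, Nat.zero_add] at h1
  rw [h1, pvBLoop_zero]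
  cases hf : pvFvi word.toList with
  | none =>
    have hnv : ∀ x ∈ word.toList, x ∉ pvVowels := (pvFvi_none_iff _).mp hf
    have htail : PySem.List.slice word.toList (some (0 + 1)) none = word.toList.drop 1 := by
      rw [(by norm_num : (0 : Int) + 1 = ((1 : Nat) : Int)), PySem.List.slice_from_natCast]
    rw [htail]
    have hfd : pvFvi (word.toList.drop 1) = none :=
      (pvFvi_none_iff _).mpr fun x hx => hnv x (List.mem_of_mem_drop hx)
    have h2 := pvALoop2_split (word.toList.drop 1) 0 [] (word.toList.drop 1) rfl (by simp)
    rw [h2, hfd]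
    simp
  | some j =>
    have htail : PySem.List.slice word.toList (some ((j : Int) + 1)) none = word.toList.drop (j + 1) := by
      rw [(by push_cast; ring : ((j : Int)) + 1 = (((j + 1 : Nat)) : Int)), PySem.List.slice_from_natCast]
    rw [htail]
    have h2 := pvALoop2_split (word.toList.drop (j + 1)) (j : Int) [] (word.toList.drop (j + 1)) rfl (by simp)
    rw [h2]
    cases hfd : pvFvi (word.toList.drop (j + 1)) with
    | none => simp [hfd]
    | some k =>
      simp only [List.length_nil, Nat.zero_add]
      have hne : ((k : Nat) : Int) + 1 + (j : Int) + 1 ≠ 0 := by positivity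
      rw [if_pos hne]
      have hb : ((k : Nat) : Int) + 1 + (j : Int) + 1 = ((k + (0 + j + 1) : Nat) : Int) + 1 := by
        push_cast; ring
      rw [hb]
      simp [hfd]
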